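-- pv_equiv track=rewrite | github.com/Matii111/trabajo-buscaminas | buscaminasOriginal.py | enola_gay2
-- ===== SOURCE A (Python) =====
-- def enola_gay2(tab_inv,bombb,bom_restantes,j):
--     xddd = 0
--     zz = 0
--     jardani = 0
--     while bom_restantes > 0 :
--         for i in bombb:
--             for n in i:
--                 xddd = xddd + 1
--                 if xddd == 1 :
--                     k = n
--                 elif xddd == 2:
--                     y = n
--                     xddd = 0
--                     tab_inv[y-1][k] = '*'
--         return tab_inv
-- ===== SOURCE B (Python) =====
-- def enola_gay2(tab_inv, bombb, bom_restantes, j):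
--     if bom_restantes > 0:
--         flat = [n for i in bombb for n in i]
--         for k, y in zip(flat[::2], flat[1::2]):
--             tab_inv[y-1][k] = '*'
--         return tab_inv
-- ===== Notes on version B (the rewrite author's own statement) =====
-- stated objective: simpler
-- what changed: Flattens the coordinate lists once and assigns each (k, y) pair directly via zip of strided slices, replacing the nested element loops driven by the xddd mod-2 counter state machine.
-- outside the precondition, e.g. on enola_gay2([['.']], [[0, 1]], 0, 0): A returns None, B returns None
import Mathlib
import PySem

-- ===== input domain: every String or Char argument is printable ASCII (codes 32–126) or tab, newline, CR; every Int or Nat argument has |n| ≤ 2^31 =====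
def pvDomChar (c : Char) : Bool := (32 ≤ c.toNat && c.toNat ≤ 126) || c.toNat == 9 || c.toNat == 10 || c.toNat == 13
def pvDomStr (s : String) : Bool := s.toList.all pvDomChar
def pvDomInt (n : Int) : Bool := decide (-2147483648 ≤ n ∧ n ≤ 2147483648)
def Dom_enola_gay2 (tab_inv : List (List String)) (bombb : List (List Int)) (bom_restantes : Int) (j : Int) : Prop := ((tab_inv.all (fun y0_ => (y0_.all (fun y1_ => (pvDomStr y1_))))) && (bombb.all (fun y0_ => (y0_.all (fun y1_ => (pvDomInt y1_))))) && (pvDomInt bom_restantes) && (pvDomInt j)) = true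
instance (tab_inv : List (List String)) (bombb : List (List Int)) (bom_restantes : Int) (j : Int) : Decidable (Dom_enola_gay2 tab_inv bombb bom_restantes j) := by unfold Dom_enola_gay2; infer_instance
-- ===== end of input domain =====

-- B flattens the coordinates once and assigns each (k,y) pair directly (zip of strided
-- slices) instead of A's nested loops with the xddd mod-2 counter state machine: simpler.
-- Both Pythons mutate tab_inv in place identically; the theorems are about the return value.


-- ===== PORT A =====
-- tab_inv[y-1][k] = '*'  (Python 2-D item assignment; negative indices wrap, out of range =
-- IndexError, excluded by Pre_, where the helper leaves tab unchanged)
def pvStar (tab : List (List String)) (y : Int) (k : Int) : List (List String) :=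
  match PySem.List.pyGet? tab y with
  | some row => PySem.List.pySetD tab y (PySem.List.pySetD row k "*")
  | none => tab

-- one step of A's inner loop body; state = (xddd, k, tab_inv).  The unused zz/jardani and
-- the uninitialised k (first read only after xddd == 1 stored it) are modelled by k := 0.
def pvStepA (st : Int × Int × List (List String)) (n : Int) : Int × Int × List (List String) :=
  let xddd := st.1 + 1
  if xddd = 1 then (xddd, n, st.2.2)
  else if xddd = 2 then (0, st.2.1, pvStar st.2.2 (n - 1) st.2.1)
  else (xddd, st.2.1, st.2.2)

-- the while loop returns during its first iteration; bom_restantes ≤ 0 means Python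
-- returns None (no value of the type) — excluded by Pre_, the port returns tab_inv there.
def enola_gay2 (tab_inv : List (List String)) (bombb : List (List Int)) (bom_restantes : Int) (j : Int) : List (List String) :=
  if bom_restantes > 0 then
    (bombb.foldl (fun st i => i.foldl pvStepA st) ((0 : Int), (0 : Int), tab_inv)).2.2
  else tab_inv

-- ===== PORT B =====
-- flat[::2] (step-2 slice, ported by hand — exact: keeps every element at even offset)
def pvStride2 : List Int → List Int
  | [] => []
  | [a] => [a]
  | a :: _ :: r => a :: pvStride2 r

-- bom_restantes ≤ 0: B's Python also returns None (excluded by Pre_); port returns tab_inv.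
def enola_gay2_alt (tab_inv : List (List String)) (bombb : List (List Int)) (bom_restantes : Int) (j : Int) : List (List String) :=
  if bom_restantes > 0 then
    let flat := bombb.flatten
    ((pvStride2 flat).zip (pvStride2 flat.tail)).foldl
      (fun tab p => pvStar tab (p.2 - 1) p.1) tab_inv
  else tab_inv

-- ===== PRECONDITION & SPEC =====
-- the (k, y) pairs Python A reads off the flattened bomb coordinates (used only by Pre_)
def pvPairs : List Int → List (Int × Int)
  | k :: y :: r => (k, y) :: pvPairs r
  | _ => []

-- Pre_ excludes bom_restantes ≤ 0, where A falls through the while loop and returns None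
-- (not a List[List[str]] value), and coordinate pairs whose indices make
-- tab_inv[y-1][k] = '*' raise IndexError (row lengths never change, so validity w.r.t. the
-- original tab_inv is exact).
def Pre_enola_gay2 (tab_inv : List (List String)) (bombb : List (List Int)) (bom_restantes : Int) (j : Int) : Prop :=
  bom_restantes > 0 ∧
  ∀ p ∈ pvPairs bombb.flatten,
    PySem.Raise.InRange tab_inv.length (p.2 - 1) ∧
    PySem.Raise.InRange (PySem.List.pyGetD tab_inv (p.2 - 1) []).length p.1
instance (tab_inv : List (List String)) (bombb : List (List Int)) (bom_restantes : Int) (j : Int) : Decidable (Pre_enola_gay2 tab_inv bombb bom_restantes j) := by unfold Pre_enola_gay2; infer_instance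

def pvWitness_enola_gay2 : List (List String) × List (List Int) × Int × Int :=
  ([["."], ["."]], [[0, 1, 0, 2]], 1, 5)

def Spec_enola_gay2 (tab_inv : List (List String)) (bombb : List (List Int)) (bom_restantes : Int) (j : Int) (out : List (List String)) : Prop := out = enola_gay2_alt tab_inv bombb bom_restantes j
instance (tab_inv : List (List String)) (bombb : List (List Int)) (bom_restantes : Int) (j : Int) (out : List (List String)) : Decidable (Spec_enola_gay2 tab_inv bombb bom_restantes j out) := by unfold Spec_enola_gay2; infer_instance

-- ===== CLAIM (what is proved, stated in full; the proofs are below) =====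
def Claim_equal_enola_gay2 : Prop := ∀ (tab_inv : List (List String)) (bombb : List (List Int)) (bom_restantes : Int) (j : Int), Dom_enola_gay2 tab_inv bombb bom_restantes j → Pre_enola_gay2 tab_inv bombb bom_restantes j → Spec_enola_gay2 tab_inv bombb bom_restantes j (enola_gay2 tab_inv bombb bom_restantes j)

-- ===== LEMMAS AND PROOFS =====

-- B's zip of the two strided slices is exactly the pair stream A's counter walks through
theorem pvStride2_zip_eq_pairs (l : List Int) :
    (pvStride2 l).zip (pvStride2 l.tail) = pvPairs l := by
  induction l using pvStride2.induct with
  | case1 => rfl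
  | case2 a => rfl
  | case3 a b r ih =>
    cases r with
    | nil => rfl
    | cons c s => simpa [pvStride2, pvPairs] using ih

-- A's fold over the flattened stream, started at xddd = 0, performs exactly one pvStar per
-- consecutive pair (the carried k value is irrelevant: the next pair overwrites it)
theorem pvFoldA_eq_pairs (l : List Int) (k0 : Int) (tab : List (List String)) :
    (l.foldl pvStepA (0, k0, tab)).2.2 =
      (pvPairs l).foldl (fun t p => pvStar t (p.2 - 1) p.1) tab := by
  induction l using pvPairs.induct generalizing k0 tab with
  | case1 k y r ih => simpa [pvStepA, pvPairs] using ih k _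
  | case2 l h =>
    cases l with
    | nil => rfl
    | cons a t =>
      cases t with
      | nil => simp [pvStepA, pvPairs]
      | cons b s => exact absurd rfl (h a b s)

-- nested fold over the rows = fold over the flattened list
theorem pvFoldA_flatten (bombb : List (List Int)) (st : Int × Int × List (List String)) :
    bombb.foldl (fun st i => i.foldl pvStepA st) st = bombb.flatten.foldl pvStepA st := by
  induction bombb generalizing st with
  | nil => rfl
  | cons i r ih => simp [List.foldl_append, ih]

-- ===== VERDICT (by name: the statement is the Claim_ definition above) =====
theorem enola_gay2_spec : Claim_equal_enola_gay2 := by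
  intro tab_inv bombb bom_restantes j _ hpre
  unfold Spec_enola_gay2 enola_gay2 enola_gay2_alt
  rcases hpre with ⟨hpos, -⟩
  simp only [hpos, if_pos]
  rw [pvFoldA_flatten, pvFoldA_eq_pairs, pvStride2_zip_eq_pairs]
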